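-- pv_equiv track=rewrite | github.com/miliar/Code_Jam_Webscraper | solutions_python/solutions_year12_round0_nr2/501.py | allways
-- ===== SOURCE A (Python) =====
-- def allways(score):
--
--     def ways(score,n):
--         if n==1:
--             if 0<=score<=10:
--                 return [[score]]
--             else:
--                 return []
--         else:
--             return [[i]+w for i in range(0,11)
--                           for w in ways(score-i,n-1)
--                           if i<=w[0]]
--
--     return ways(score,3)
-- ===== SOURCE B (Python) =====
-- def allways(score):
--     res = []
--     for i in range(11):
--         for j in range(i, 11):
--             for k in range(j, 11):
--                 if i + j + k == score:
--                     res.append([i, j, k])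
--     return res
-- ===== Notes on version B (the rewrite author's own statement) =====
-- stated objective: simpler
-- what changed: Replaces the general recursive ways helper (list comprehensions with a non-decreasing filter) by three explicit nested loops specialized to triples of digits, appending [i,j,k] when i+j+k equals the score.
import Mathlib
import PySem

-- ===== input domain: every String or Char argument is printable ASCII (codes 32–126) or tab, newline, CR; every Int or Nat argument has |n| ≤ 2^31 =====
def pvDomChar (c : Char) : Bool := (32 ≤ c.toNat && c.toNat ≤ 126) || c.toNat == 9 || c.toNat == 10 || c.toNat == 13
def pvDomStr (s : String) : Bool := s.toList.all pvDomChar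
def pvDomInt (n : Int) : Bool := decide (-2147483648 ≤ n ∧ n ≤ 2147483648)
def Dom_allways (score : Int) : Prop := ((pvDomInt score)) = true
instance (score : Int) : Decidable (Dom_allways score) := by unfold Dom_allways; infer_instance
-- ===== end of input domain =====

-- B replaces the recursive ways(score,n) helper by three explicit nested loops
-- specialized to triples of digits (objective: simpler).
set_option maxRecDepth 4000


-- ===== PORT A =====
-- ways(score, n): A only calls it with n = 3 (recursing to 1); the n = 0 case is
-- unreachable in A (Python would recurse forever there).
def waysA (score : Int) : Nat → List (List Int)
  | 0 => []
  | 1 =>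
      if 0 ≤ score ∧ score ≤ 10 then [[score]] else []
  | Nat.succ (Nat.succ m) =>
      -- [[i]+w for i in range(0,11) for w in ways(score-i,n-1) if i<=w[0]]
      -- w is always nonempty here, so w[0] is ported as pyGetD w 0 0 (exact on nonempty w)
      (PySem.List.pyRange 0 11 1).flatMap (fun i =>
        ((waysA (score - i) (Nat.succ m)).filter
          (fun w => decide (i ≤ PySem.List.pyGetD w 0 0))).map (fun w => [i] ++ w))

def allways (score : Int) : List (List Int) := waysA score 3

-- ===== PORT B =====
def allways_alt (score : Int) : List (List Int) :=
  (PySem.List.pyRange 0 11 1).foldl (fun res i =>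
    (PySem.List.pyRange i 11 1).foldl (fun res j =>
      (PySem.List.pyRange j 11 1).foldl (fun res k =>
        if i + j + k == score then res ++ [[i, j, k]] else res) res) res) []

-- ===== PRECONDITION & SPEC =====
def Spec_allways (score : Int) (out : List (List Int)) : Prop := out = allways_alt score
instance (score : Int) (out : List (List Int)) : Decidable (Spec_allways score out) := by unfold Spec_allways; infer_instance

-- ===== CLAIM (what is proved, stated in full; the proofs are below) =====
def Claim_equal_allways : Prop := ∀ (score : Int), Dom_allways score → Spec_allways score (allways score)

-- ===== LEMMAS AND PROOFS =====

-- A is empty for score outside [0, 10*n]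
theorem waysA_empty (n : Nat) : ∀ score : Int, (score < 0 ∨ 10 * (n : Int) < score) → waysA score n = [] := by
  induction n with
  | zero => intro s _; rfl
  | succ m ih =>
    intro s hs
    match m with
    | 0 =>
      simp only [waysA]
      rw [if_neg]; omega
    | Nat.succ m' =>
      simp only [waysA]
      rw [List.flatMap_eq_nil_iff]
      intro i hi
      have hib : 0 ≤ i ∧ i < 11 := (PySem.List.mem_pyRange_one).1 hi
      rw [ih (s - i) (by push_cast; omega)]
      rfl

theorem allways_empty (score : Int) (h : score < 0 ∨ 30 < score) : allways score = [] := by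
  unfold allways
  exact waysA_empty 3 score (by simpa using h)

-- B is empty for score outside [0, 30]
theorem alt_inner_empty (score j i : Int) (h : score < 0 ∨ 30 < score)
    (hj : 0 ≤ j) (hj2 : j ≤ 10) (hi : 0 ≤ i) (hi2 : i ≤ 10) (acc : List (List Int)) :
    (PySem.List.pyRange j 11 1).foldl (fun res k =>
      if i + j + k == score then res ++ [[i, j, k]] else res) acc = acc := by
  rw [PySem.List.foldl_append_if]
  have : (PySem.List.pyRange j 11 1).filter (fun k => i + j + k == score) = [] := by
    rw [List.filter_eq_nil_iff]
    intro k hk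
    have hkb := (PySem.List.mem_pyRange_one).1 hk
    simp only [beq_iff_eq]
    omega
  rw [this]; simp

theorem alt_mid_empty (score i : Int) (h : score < 0 ∨ 30 < score) (hi : 0 ≤ i) (hi2 : i ≤ 10)
    (acc : List (List Int)) :
    (PySem.List.pyRange i 11 1).foldl (fun res j =>
      (PySem.List.pyRange j 11 1).foldl (fun res k =>
        if i + j + k == score then res ++ [[i, j, k]] else res) res) acc = acc := by
  have gen : ∀ (L : List Int), (∀ j ∈ L, 0 ≤ j ∧ j ≤ 10) → ∀ acc : List (List Int),
      L.foldl (fun res j =>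
        (PySem.List.pyRange j 11 1).foldl (fun res k =>
          if i + j + k == score then res ++ [[i, j, k]] else res) res) acc = acc := by
    intro L
    induction L with
    | nil => intro _ acc; rfl
    | cons x xs ih =>
      intro hpos acc
      simp only [List.foldl_cons]
      rw [alt_inner_empty score x i h (hpos x (by simp)).1 (hpos x (by simp)).2 hi hi2 acc]
      exact ih (fun j hj => hpos j (by simp [hj])) acc
  exact gen _ (fun j hj => by have := (PySem.List.mem_pyRange_one).1 hj; omega) acc

theorem allways_alt_empty (score : Int) (h : score < 0 ∨ 30 < score) : allways_alt score = [] := by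
  unfold allways_alt
  have : ∀ (L : List Int), (∀ i ∈ L, 0 ≤ i ∧ i ≤ 10) → ∀ acc : List (List Int),
      L.foldl (fun res i =>
        (PySem.List.pyRange i 11 1).foldl (fun res j =>
          (PySem.List.pyRange j 11 1).foldl (fun res k =>
            if i + j + k == score then res ++ [[i, j, k]] else res) res) res) acc = acc := by
    intro L
    induction L with
    | nil => intro _ acc; rfl
    | cons x xs ih =>
      intro hpos acc
      simp only [List.foldl_cons]
      rw [alt_mid_empty score x h (hpos x (by simp)).1 (hpos x (by simp)).2 acc]
      exact ih (fun i hi => hpos i (by simp [hi])) acc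
  apply this
  intro i hi
  have := (PySem.List.mem_pyRange_one).1 hi
  omega

-- ===== VERDICT (by name: the statement is the Claim_ definition above) =====
theorem allways_spec : Claim_equal_allways := by
  intro score _
  unfold Spec_allways
  by_cases h : 0 ≤ score ∧ score ≤ 30
  · obtain ⟨h1, h2⟩ := h
    interval_cases score <;> decide
  · rw [allways_empty score (by omega), allways_alt_empty score (by omega)]
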